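-- pv_equiv track=rewrite | github.com/tomster12/coding | general/noita/eyes/phase_2/shared.py | calculate_pattern
-- ===== SOURCE A (Python) =====
-- from typing import List
--
-- def calculate_pattern(text: str) -> List[int]:
--     instances = {}
--     values = {}
--     next_value = 0
--     for c in text:
--         if c not in instances:
--             instances[c] = []
--         instances[c].append(c)
--         if len(instances[c]) == 2:
--             values[c] = next_value
--             next_value += 1
--
--     pattern = []
--     for c in text:
--         if c in values:
--             pattern.append(values[c])
--         else:
--             pattern.append(None)
--     return pattern
-- ===== SOURCE B (Python) =====
-- def calculate_pattern(text):
--     # one pass: record each character's second-occurrence index (no ordinal counter)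
--     seen = set()
--     second = {}
--     for i, c in enumerate(text):
--         if c in seen and c not in second:
--             second[c] = i
--         seen.add(c)
--     # ordinal of a repeated character = rank of its second-occurrence index
--     order = sorted(second.values())
--     return [order.index(second[c]) if c in second else None for c in text]
-- ===== Notes on version B (the rewrite author's own statement) =====
-- stated objective: alternative
-- what changed: A builds per-char occurrence lists and assigns ordinals online with a counter into a values dict; B never assigns ordinals: one pass records each repeated character's second-occurrence index, and the output rank is recovered offline as the position of that index in the sorted list of all second-occurrence indices.
import Mathlib
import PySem

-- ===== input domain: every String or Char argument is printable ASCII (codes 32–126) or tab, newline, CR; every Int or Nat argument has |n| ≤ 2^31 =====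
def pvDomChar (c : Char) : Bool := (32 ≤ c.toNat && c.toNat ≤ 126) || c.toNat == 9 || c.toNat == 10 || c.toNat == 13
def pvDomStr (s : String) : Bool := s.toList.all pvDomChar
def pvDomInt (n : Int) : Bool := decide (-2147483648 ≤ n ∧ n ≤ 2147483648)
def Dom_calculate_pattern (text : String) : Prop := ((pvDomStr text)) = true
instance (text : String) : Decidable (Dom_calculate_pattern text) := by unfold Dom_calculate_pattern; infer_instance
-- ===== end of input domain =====

-- B drops A's occurrence lists and online ordinal counter: it records each repeated character's
-- second-occurrence index in one pass and recovers the ordinal as the rank of that index in the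
-- sorted list of second-occurrence indices (objective: alternative).

-- ===== PORT A =====
def calculate_pattern (text : String) : List (Option Int) :=
  let st := text.toList.foldl
    (fun (st : PySem.Dict Char (List Char) × PySem.Dict Char Int × Int) c =>
      let instances := if st.1.contains c then st.1 else st.1.insert c []
      let instances := instances.modify c [] (fun l => l ++ [c])
      if (instances.getD c []).length == 2 then
        (instances, st.2.1.insert c st.2.2, st.2.2 + 1)
      else
        (instances, st.2.1, st.2.2))
    (PySem.Dict.empty, PySem.Dict.empty, 0)
  text.toList.foldl
    (fun pattern c =>
      if st.2.1.contains c then pattern ++ [st.2.1.get? c] else pattern ++ [none]) []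

-- ===== PORT B =====
def calculate_pattern_alt (text : String) : List (Option Int) :=
  let st := (PySem.List.enumerate text.toList).foldl
    (fun (st : PySem.Set Char × PySem.Dict Char Int) p =>
      let second := if PySem.Set.contains st.1 p.2 && !(st.2.contains p.2)
                    then st.2.insert p.2 p.1 else st.2
      (PySem.Set.add st.1 p.2, second))
    (PySem.Set.empty, PySem.Dict.empty)
  let second := st.2
  let order := PySem.List.sorted second.values (fun x => x) false
  text.toList.map (fun c =>
    match second.get? c with
    | some v => (PySem.List.index? order v).map (fun k => (k : Int))
    | none => none)

-- ===== PRECONDITION & SPEC =====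
def Spec_calculate_pattern (text : String) (out : List (Option Int)) : Prop := out = calculate_pattern_alt text
instance (text : String) (out : List (Option Int)) : Decidable (Spec_calculate_pattern text out) := by unfold Spec_calculate_pattern; infer_instance

-- ===== CLAIM (what is proved, stated in full; the proofs are below) =====
def Claim_equal_calculate_pattern : Prop := ∀ (text : String), Dom_calculate_pattern text → Spec_calculate_pattern text (calculate_pattern text)

-- ===== LEMMAS AND PROOFS =====

-- the second-occurrence positions of `l`, in text order, as (char, index) pairs
def pvSec (l : List Char) : List (Char × Int) :=
  ((PySem.List.enumerate l).filter
      (fun p => (PySem.List.slice l none (some p.1)).count p.2 == 1)).map (fun p => (p.2, p.1))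

theorem pvSec_snoc (l : List Char) (c : Char) :
    pvSec (l ++ [c]) = pvSec l ++ (if l.count c = 1 then [(c, (l.length : Int))] else []) := by
  unfold pvSec
  rw [PySem.List.enumerate_append, List.filter_append, List.map_append]
  congr 1
  · apply congrArg (List.map _)
    apply List.filter_congr
    intro p hp
    obtain ⟨k, hk, rfl⟩ := (PySem.List.mem_enumerate_iff _ _ _).1 hp
    simp only [zero_add, PySem.List.slice_to_natCast,
      List.take_append_of_le_length (le_of_lt hk)]
  · have h1 : PySem.List.enumerate [c] (0 + (l.length : Int)) = [((l.length : Int), c)] := by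
      simp [PySem.List.enumerate_cons, PySem.List.enumerate_nil]
    rw [h1]
    by_cases h : l.count c = 1
    · simp [PySem.List.slice_to_natCast, h]
    · simp [PySem.List.slice_to_natCast, h]

-- a char cannot have two "second occurrences"
theorem pvSecond_unique (l : List Char) (k m : Nat) (hk : k < l.length) (hm : m < l.length)
    (hkm : k < m) (h1 : (l.take k).count l[k] = 1) (h2 : (l.take m).count l[m] = 1) :
    l[k] ≠ l[m] := by
  intro he
  have hsub : (l.take (k+1)).Sublist (l.take m) := by
    have ht : l.take (k+1) = (l.take m).take (k+1) := by
      rw [List.take_take]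
      congr 1
      omega
    rw [ht]
    exact List.take_sublist _ _
  have hc : (l.take (k+1)).count l[m] = 2 := by
    rw [List.take_add_one]
    have hg : l[k]? = some l[m] := by rw [List.getElem?_eq_getElem hk, he]
    rw [hg]
    simp only [Option.toList_some, List.count_append, List.count_singleton]
    rw [← he, h1]
    simp
  have hle := hsub.count_le l[m]
  omega

theorem pvSec_pair_ne (l : List Char) :
    ((PySem.List.enumerate l).filter
      (fun p => (PySem.List.slice l none (some p.1)).count p.2 == 1)).Pairwise
      (fun p q => p.2 ≠ q.2) := by
  have h := (PySem.List.pairwise_lt_enumerate l 0).filter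
      (fun p => (PySem.List.slice l none (some p.1)).count p.2 == 1)
  refine h.imp_of_mem ?_
  intro p q hp hq hlt
  obtain ⟨hp1, hp2⟩ := List.mem_filter.1 hp
  obtain ⟨hq1, hq2⟩ := List.mem_filter.1 hq
  obtain ⟨k, hk, rfl⟩ := (PySem.List.mem_enumerate_iff _ _ _).1 hp1
  obtain ⟨m, hm, rfl⟩ := (PySem.List.mem_enumerate_iff _ _ _).1 hq1
  simp only [zero_add, PySem.List.slice_to_natCast, beq_iff_eq] at hp2 hq2
  simp only [zero_add] at hlt
  exact pvSecond_unique l k m hk hm (by exact_mod_cast hlt) hp2 hq2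

theorem pvSec_fst_nodup (l : List Char) : ((pvSec l).map (·.1)).Nodup := by
  unfold pvSec
  rw [List.map_map]
  exact List.pairwise_map.mpr (pvSec_pair_ne l)

theorem pvSec_snd_lt (l : List Char) : ((pvSec l).map (·.2)).Pairwise (· < ·) := by
  unfold pvSec
  rw [List.map_map]
  refine List.pairwise_map.mpr ?_
  exact ((PySem.List.pairwise_lt_enumerate l 0).filter _).imp (fun h => h)

theorem pvSec_mem_fst (l : List Char) (c : Char) :
    c ∈ (pvSec l).map (·.1) ↔ 2 ≤ l.count c := by
  induction l using List.reverseRecOn with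
  | nil => simp [pvSec, PySem.List.enumerate_nil]
  | append_singleton l a ih =>
    have hcount : (l ++ [a]).count c = l.count c + (if c = a then 1 else 0) := by
      by_cases hca : c = a
      · subst hca; simp [List.count_append]
      · simp [List.count_append, hca, Ne.symm hca]
    rw [pvSec_snoc, List.map_append, hcount, List.mem_append, ih]
    by_cases hca : c = a
    · subst hca
      have hone : (if c = c then 1 else 0) = 1 := if_pos rfl
      rw [hone]
      by_cases h : l.count c = 1
      · rw [if_pos h]
        simp only [List.map_cons, List.map_nil, List.mem_cons, List.not_mem_nil, or_false]
        constructor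
        · intro _; omega
        · intro _; right; trivial
      · rw [if_neg h]
        simp only [List.map_nil, List.not_mem_nil, or_false]
        omega
    · simp only [if_neg hca, Nat.add_zero]
      have hnm : c ∉ (if l.count a = 1 then [(a, (l.length : Int))] else []).map (·.1) := by
        split <;> simp [hca]
      simp [hnm]

-- ---------- A side ----------

def pvStepA (st : PySem.Dict Char (List Char) × PySem.Dict Char Int × Int) (c : Char) :
    PySem.Dict Char (List Char) × PySem.Dict Char Int × Int :=
  let instances := if st.1.contains c then st.1 else st.1.insert c []
  let instances := instances.modify c [] (fun l => l ++ [c])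
  if (instances.getD c []).length == 2 then
    (instances, st.2.1.insert c st.2.2, st.2.2 + 1)
  else
    (instances, st.2.1, st.2.2)

def pvFoldA (l : List Char) : PySem.Dict Char (List Char) × PySem.Dict Char Int × Int :=
  l.foldl pvStepA (PySem.Dict.empty, PySem.Dict.empty, 0)

-- A's values dict: (char, ordinal in second-occurrence order)
def pvValsA (l : List Char) : PySem.Dict Char Int :=
  PySem.Dict.mk ((PySem.List.enumerate ((pvSec l).map (·.1))).map (fun p => (p.2, p.1)))

theorem pvValsA_keys (l : List Char) : (pvValsA l).keys = (pvSec l).map (·.1) := by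
  show (((PySem.List.enumerate ((pvSec l).map (·.1))).map (fun p => (p.2, p.1))).map (·.1)) = _
  rw [List.map_map]
  exact PySem.List.map_snd_enumerate _ _

theorem pvValsA_snoc (l : List Char) (c : Char) (h : l.count c = 1) :
    pvValsA (l ++ [c]) = (pvValsA l).insert c (((pvSec l).length : Int)) := by
  have hnc : (pvValsA l).contains c = false := by
    rw [PySem.Dict.contains_eq_decide_mem_keys, pvValsA_keys]
    simp [pvSec_mem_fst, h]
  apply PySem.Dict.ext
  rw [PySem.Dict.items_insert_of_not_contains _ _ hnc]
  show ((PySem.List.enumerate ((pvSec (l ++ [c])).map (·.1))).map (fun p => (p.2, p.1)))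
      = ((PySem.List.enumerate ((pvSec l).map (·.1))).map (fun p => (p.2, p.1))) ++ _
  rw [pvSec_snoc, if_pos h, List.map_append, PySem.List.enumerate_append, List.map_append]
  congr 1
  simp [PySem.List.enumerate_cons, PySem.List.enumerate_nil]

theorem pvValsA_snoc_ne (l : List Char) (c : Char) (h : l.count c ≠ 1) :
    pvValsA (l ++ [c]) = pvValsA l := by
  unfold pvValsA
  rw [pvSec_snoc, if_neg h, List.append_nil]

theorem pvFoldA_invariant (l : List Char) :
    (pvFoldA l).2.1 = pvValsA l ∧
    (pvFoldA l).2.2 = ((pvSec l).length : Int) ∧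
    (∀ c : Char, (pvFoldA l).1.contains c = decide (0 < l.count c)) ∧
    (∀ c : Char, (pvFoldA l).1.getD c [] = List.replicate (l.count c) c) := by
  induction l using List.reverseRecOn with
  | nil => refine ⟨rfl, rfl, fun c => rfl, fun c => rfl⟩
  | append_singleton l c ih =>
    obtain ⟨hv, hn, hcont, hgetD⟩ := ih
    have hfold : pvFoldA (l ++ [c]) = pvStepA (pvFoldA l) c := List.foldl_concat _ _ _ _
    rw [hfold]
    unfold pvStepA
    have hins : (if (pvFoldA l).1.contains c then (pvFoldA l).1 else (pvFoldA l).1.insert c []).getD c []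
        = List.replicate (l.count c) c := by
      by_cases h0 : 0 < l.count c
      · rw [if_pos (by rw [hcont]; simpa using h0), hgetD]
      · rw [if_neg (by rw [hcont]; simpa using h0), PySem.Dict.getD_insert_self]
        have : l.count c = 0 := by omega
        simp [this]
    have hgetD2 : ∀ c' : Char,
        (((if (pvFoldA l).1.contains c then (pvFoldA l).1 else (pvFoldA l).1.insert c []).modify c []
            (fun l => l ++ [c])).getD c' []) = List.replicate ((l ++ [c]).count c') c' := by
      intro c'
      by_cases hc : c' = c
      · subst hc
        rw [PySem.Dict.getD_modify_self, hins]
        simp [List.count_append, ← List.replicate_succ']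
      · rw [PySem.Dict.getD_modify_of_ne _ _ _ hc]
        have h1 : (if (pvFoldA l).1.contains c then (pvFoldA l).1 else (pvFoldA l).1.insert c []).getD c' []
            = (pvFoldA l).1.getD c' [] := by
          split
          · rfl
          · exact PySem.Dict.getD_insert_of_ne _ _ _ hc
        rw [h1, hgetD]
        simp [List.count_append, Ne.symm hc]
    have hcont2 : ∀ c' : Char,
        (((if (pvFoldA l).1.contains c then (pvFoldA l).1 else (pvFoldA l).1.insert c []).modify c []
            (fun l => l ++ [c])).contains c') = decide (0 < (l ++ [c]).count c') := by
      intro c'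
      rw [PySem.Dict.contains_modify]
      by_cases hc : c' = c
      · subst hc
        simp [List.count_append]
      · have h1 : (if (pvFoldA l).1.contains c then (pvFoldA l).1 else (pvFoldA l).1.insert c []).contains c'
            = (pvFoldA l).1.contains c' := by
          split
          · rfl
          · rw [PySem.Dict.contains_insert]; simp [hc]
        rw [h1, hcont c']
        simp [hc, List.count_append, Ne.symm hc]
    by_cases h2 : l.count c = 1
    · rw [if_pos (by simp [h2, hins])]
      refine ⟨?_, ?_, hcont2, hgetD2⟩
      · simpa [hv, hn] using (pvValsA_snoc l c h2).symm
      · rw [pvSec_snoc, if_pos h2]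
        simp only [List.length_append, List.length_cons, List.length_nil]
        rw [hn]; push_cast; ring
    · rw [if_neg (by simp [hins]; omega)]
      refine ⟨?_, ?_, hcont2, hgetD2⟩
      · simpa [hv] using (pvValsA_snoc_ne l c h2).symm
      · rw [pvSec_snoc, if_neg h2]
        simp [hn]

theorem calculate_pattern_eq_map (text : String) :
    calculate_pattern text = text.toList.map (fun c => (pvValsA text.toList).get? c) := by
  have hA : calculate_pattern text
      = text.toList.foldl (fun pattern c =>
          if (pvFoldA text.toList).2.1.contains c then pattern ++ [(pvFoldA text.toList).2.1.get? c]
          else pattern ++ [none]) [] := rfl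
  obtain ⟨hv, -, -, -⟩ := pvFoldA_invariant text.toList
  rw [hA, hv]
  have hstep : (fun (pattern : List (Option Int)) c =>
      if (pvValsA text.toList).contains c then pattern ++ [(pvValsA text.toList).get? c]
      else pattern ++ [none])
      = fun pattern c => pattern ++ [(pvValsA text.toList).get? c] := by
    funext pattern c
    by_cases h : (pvValsA text.toList).contains c
    · rw [if_pos h]
    · rw [if_neg h]
      rw [(PySem.Dict.get?_eq_none_iff_contains _ _).2 (by simpa using h)]
  rw [hstep, PySem.List.foldl_append_singleton_eq_map]
  simp

-- ---------- B side ----------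

def pvStepB (st : PySem.Set Char × PySem.Dict Char Int) (p : Int × Char) :
    PySem.Set Char × PySem.Dict Char Int :=
  let second := if PySem.Set.contains st.1 p.2 && !(st.2.contains p.2)
                then st.2.insert p.2 p.1 else st.2
  (PySem.Set.add st.1 p.2, second)

theorem pvSec_contains_mk (l : List Char) (c : Char) :
    (PySem.Dict.mk (pvSec l)).contains c = decide (2 ≤ l.count c) := by
  rw [PySem.Dict.contains_eq_decide_mem_keys]
  have hk : (PySem.Dict.mk (pvSec l)).keys = (pvSec l).map (·.1) := rfl
  rw [hk]
  simp [pvSec_mem_fst]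

theorem pvFoldB_spec (l : List Char) :
    (PySem.List.enumerate l).foldl pvStepB (PySem.Set.empty, PySem.Dict.empty)
      = (PySem.Set.ofList l, PySem.Dict.mk (pvSec l)) := by
  induction l using List.reverseRecOn with
  | nil => rfl
  | append_singleton l c ih =>
    rw [PySem.List.enumerate_append, List.foldl_append, ih]
    have h1 : PySem.List.enumerate [c] (0 + (l.length : Int)) = [((l.length : Int), c)] := by
      simp [PySem.List.enumerate_cons, PySem.List.enumerate_nil]
    rw [h1]
    simp only [List.foldl_cons, List.foldl_nil]
    unfold pvStepB
    have hseen : PySem.Set.add (PySem.Set.ofList l) c = PySem.Set.ofList (l ++ [c]) :=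
      (PySem.Set.ofList_append_singleton l c).symm
    have hmem : PySem.Set.contains (PySem.Set.ofList l) c = decide (c ∈ l) := by
      simp [PySem.Set.contains, PySem.Set.mem_ofList]
    by_cases h : l.count c = 1
    · have hcond : (PySem.Set.contains (PySem.Set.ofList l) c
          && !((PySem.Dict.mk (pvSec l)).contains c)) = true := by
        rw [hmem, pvSec_contains_mk]
        have h1' : c ∈ l := by rw [← List.count_pos_iff]; omega
        simp [h1', h]
      rw [hcond]
      simp only [if_true]
      refine Prod.ext hseen ?_
      apply PySem.Dict.ext
      rw [PySem.Dict.items_insert_of_not_contains _ _ (by rw [pvSec_contains_mk]; simp; omega)]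
      show pvSec l ++ [(c, (l.length : Int))] = pvSec (l ++ [c])
      rw [pvSec_snoc, if_pos h]
    · have hcond : (PySem.Set.contains (PySem.Set.ofList l) c
          && !((PySem.Dict.mk (pvSec l)).contains c)) = false := by
        rw [hmem, pvSec_contains_mk]
        rcases Nat.lt_or_ge (l.count c) 1 with h0 | h2
        · have : ¬ (c ∈ l) := by rw [← List.count_pos_iff]; omega
          simp [this]
        · have : 2 ≤ l.count c := by omega
          simp [this]
      rw [hcond]
      simp only [Bool.false_eq_true, if_false]
      refine Prod.ext hseen ?_
      rw [pvSec_snoc, if_neg h, List.append_nil]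

-- index of the k-th element of a duplicate-free list is k
theorem pvIndex?_getElem_of_nodup (xs : List Int) (hnd : xs.Nodup) (k : Nat) (hk : k < xs.length) :
    PySem.List.index? xs xs[k] = some k := by
  rw [PySem.List.index?_eq_some_iff]
  refine ⟨xs.take k, xs.drop (k+1), ?_, by simp [le_of_lt hk], ?_⟩
  · conv_lhs => rw [← List.take_append_drop k xs]
    congr 1
    rw [List.drop_eq_getElem_cons hk]
  · intro hmem
    obtain ⟨j, hj, hjv⟩ := List.getElem_of_mem hmem
    have hjk : j < k := by
      have h' := hj
      simp only [List.length_take, lt_min_iff] at h'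
      exact h'.1
    rw [List.getElem_take] at hjv
    have := (List.Nodup.getElem_inj_iff hnd).1 hjv
    omega

-- ---------- pointwise agreement ----------

theorem pointwise (l : List Char) (c : Char) :
    (pvValsA l).get? c
      = (match (PySem.Dict.mk (pvSec l)).get? c with
         | some v => (PySem.List.index?
             (PySem.List.sorted ((PySem.Dict.mk (pvSec l)).values) (fun x => x) false) v).map
             (fun k => (k : Int))
         | none => none) := by
  have hvals : (PySem.Dict.mk (pvSec l)).values = (pvSec l).map (·.2) := rfl
  have hsorted : PySem.List.sorted ((pvSec l).map (·.2)) (fun x => x) false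
      = (pvSec l).map (·.2) :=
    PySem.List.sorted_eq_self_of_pairwise _ _ ((pvSec_snd_lt l).imp le_of_lt)
  have hndvals : ((pvSec l).map (·.2)).Nodup := (pvSec_snd_lt l).imp ne_of_lt
  have hndB : (PySem.Dict.mk (pvSec l)).keys.Nodup := pvSec_fst_nodup l
  have hndA : (pvValsA l).keys.Nodup := by rw [pvValsA_keys]; exact pvSec_fst_nodup l
  by_cases hc : c ∈ (pvSec l).map (·.1)
  · obtain ⟨k, hk, hck⟩ := List.getElem_of_mem hc
    have hkS : k < (pvSec l).length := by simpa using hk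
    have hfst : (pvSec l)[k].1 = c := by
      rw [List.getElem_map] at hck
      exact hck
    have hA : (pvValsA l).get? c = some ((k : Int)) := by
      rw [PySem.Dict.get?_eq_some_iff_mem_items _ _ _ hndA]
      show (c, (k : Int)) ∈ (PySem.List.enumerate ((pvSec l).map (·.1))).map (fun p => (p.2, p.1))
      have hlen1 : k < ((PySem.List.enumerate ((pvSec l).map (·.1))).map (fun p => (p.2, p.1))).length := by
        simp [PySem.List.length_enumerate]
        exact hkS
      have he : ((PySem.List.enumerate ((pvSec l).map (·.1))).map (fun p => (p.2, p.1)))[k]'hlen1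
          = (c, (k : Int)) := by
        rw [List.getElem_map, PySem.List.getElem_enumerate]
        simp [hck]
      rw [← he]
      exact List.getElem_mem _
    have hB : (PySem.Dict.mk (pvSec l)).get? c = some ((pvSec l)[k].2) := by
      rw [PySem.Dict.get?_eq_some_iff_mem_items _ _ _ hndB]
      show (c, (pvSec l)[k].2) ∈ pvSec l
      have : (c, (pvSec l)[k].2) = (pvSec l)[k] := by
        rw [← hfst]
      rw [this]
      exact List.getElem_mem _
    have hk2 : k < ((pvSec l).map (·.2)).length := by simpa using hkS
    have hvk : (pvSec l)[k].2 = ((pvSec l).map (·.2))[k]'hk2 := by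
      rw [List.getElem_map]
    rw [hA]
    simp only [hB, hvals, hsorted]
    rw [hvk, pvIndex?_getElem_of_nodup _ hndvals k hk2]
    rfl
  · have hA : (pvValsA l).get? c = none := by
      rw [PySem.Dict.get?_eq_none_iff_not_mem_keys, pvValsA_keys]
      exact hc
    have hB : (PySem.Dict.mk (pvSec l)).get? c = none := by
      rw [PySem.Dict.get?_eq_none_iff_not_mem_keys]
      exact hc
    rw [hA, hB]

theorem calculate_pattern_eq (text : String) : calculate_pattern text = calculate_pattern_alt text := by
  rw [calculate_pattern_eq_map]
  have hfold := pvFoldB_spec text.toList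
  unfold pvStepB at hfold
  unfold calculate_pattern_alt
  rw [hfold]
  exact List.map_congr_left (fun c _ => pointwise text.toList c)

-- ===== VERDICT (by name: the statement is the Claim_ definition above) =====
theorem calculate_pattern_spec : Claim_equal_calculate_pattern := by
  intro text _
  unfold Spec_calculate_pattern
  exact calculate_pattern_eq text
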